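-- pv_equiv track=rewrite | github.com/Computational-Finance-Laboratory/An-Adaptive-Order-Execution-for-VWAP-tracking | Backend/utils/DataProcessor.py | match_index
-- ===== SOURCE A (Python) =====
-- def match_index(list1, list2):
--     """
--     match index that contains the same value (list1 should has smaller size than list2)
--
--     return a list where index [i] represent index of list1, value[i] represent an index of list2 that has the same value
--     """
--     index = []
--     count = 0
--     for i in range(len(list1)):
--         for j in range(count, len(list2)):
--             if list1[i] == list2[j]:
--                 index.append(j)
--         count += 1
--     return index
-- ===== SOURCE B (Python) =====
-- def match_index(list1, list2):
--     """
--     match index that contains the same value (list1 should has smaller size than list2)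
--
--     return a list where index [i] represent index of list1, value[i] represent an index of list2 that has the same value
--     """
--     pos = {}
--     for j, v in enumerate(list2):
--         pos.setdefault(v, []).append(j)
--     out = []
--     for i, v in enumerate(list1):
--         for j in pos.get(v, []):
--             if j >= i:
--                 out.append(j)
--     return out
-- ===== Notes on version B (the rewrite author's own statement) =====
-- stated objective: alternative
-- what changed: B replaces A's rescan of list2 from index i for every element of list1 with a dict value->list-of-indices built once over list2, then for each list1 position scans only that value's index list keeping indices >= i.
import Mathlib
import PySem

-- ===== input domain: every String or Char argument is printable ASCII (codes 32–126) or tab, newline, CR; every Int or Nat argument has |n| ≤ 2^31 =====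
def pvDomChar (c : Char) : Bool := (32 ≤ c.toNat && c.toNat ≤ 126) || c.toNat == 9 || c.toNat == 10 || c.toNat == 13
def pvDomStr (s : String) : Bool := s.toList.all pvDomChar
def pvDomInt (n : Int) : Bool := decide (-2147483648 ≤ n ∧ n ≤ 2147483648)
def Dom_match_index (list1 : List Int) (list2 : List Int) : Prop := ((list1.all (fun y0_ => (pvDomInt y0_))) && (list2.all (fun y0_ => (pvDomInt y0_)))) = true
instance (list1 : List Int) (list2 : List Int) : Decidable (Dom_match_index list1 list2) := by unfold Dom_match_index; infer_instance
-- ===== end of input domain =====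

-- B indexes list2 once (value -> list of its indices) and, per list1 position, scans only that
-- value's index list, instead of A's rescan of list2 from i for every i; same return value everywhere.

-- ===== PORT A =====
def match_index (list1 : List Int) (list2 : List Int) : List Int :=
  ((PySem.List.pyRange 0 (PySem.List.len list1)).foldl
    (fun (st : List Int × Int) i =>
      ((PySem.List.pyRange st.2 (PySem.List.len list2)).foldl
        (fun idx j =>
          if PySem.List.pyGetD list1 i 0 == PySem.List.pyGetD list2 j 0 then idx ++ [j] else idx)
        st.1,
       st.2 + 1))
    ([], 0)).1

-- ===== PORT B =====
def match_index_alt (list1 : List Int) (list2 : List Int) : List Int :=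
  let pos : PySem.Dict Int (List Int) :=
    (PySem.List.enumerate list2).foldl
      (fun d p => d.modify p.2 [] (fun l => l ++ [p.1])) PySem.Dict.empty
  (PySem.List.enumerate list1).foldl
    (fun out p =>
      (pos.getD p.2 []).foldl (fun out j => if p.1 ≤ j then out ++ [j] else out) out)
    []

-- ===== PRECONDITION & SPEC =====
def Spec_match_index (list1 : List Int) (list2 : List Int) (out : List Int) : Prop := out = match_index_alt list1 list2
instance (list1 : List Int) (list2 : List Int) (out : List Int) : Decidable (Spec_match_index list1 list2 out) := by unfold Spec_match_index; infer_instance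

-- ===== CLAIM (what is proved, stated in full; the proofs are below) =====
def Claim_equal_match_index : Prop := ∀ (list1 : List Int) (list2 : List Int), Dom_match_index list1 list2 → Spec_match_index list1 list2 (match_index list1 list2)

-- ===== LEMMAS AND PROOFS =====

-- the per-index match list both programs produce for list1-position k
def pvHits (list1 list2 : List Int) (k : Nat) : List Int :=
  (PySem.List.pyRange (k : Int) (PySem.List.len list2)).filter
    (fun j => PySem.List.pyGetD list1 (k : Int) 0 == PySem.List.pyGetD list2 j 0)


lemma pvA_loop (list1 list2 : List Int) (t : Nat) :
    (List.range t).foldl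
      (fun (st : List Int × Int) k =>
        ((PySem.List.pyRange st.2 (PySem.List.len list2)).foldl
          (fun idx j =>
            if PySem.List.pyGetD list1 ((k : Nat) : Int) 0 == PySem.List.pyGetD list2 j 0 then
              idx ++ [j] else idx)
          st.1,
         st.2 + 1)) ([], 0)
    = ((List.range t).flatMap (pvHits list1 list2), (t : Int)) := by
  induction t with
  | zero => simp
  | succ t ih =>
      rw [List.range_succ, List.foldl_append, ih]
      simp only [List.foldl_cons, List.foldl_nil]
      rw [PySem.List.foldl_append_if_eq_filter, List.flatMap_append, Prod.mk.injEq]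
      refine ⟨?_, by push_cast; ring⟩
      simp [pvHits]

lemma match_index_eq_flatMap (list1 list2 : List Int) :
    match_index list1 list2 = (List.range list1.length).flatMap (pvHits list1 list2) := by
  unfold match_index
  rw [show PySem.List.len list1 = ((list1.length : Nat) : Int) from rfl,
      PySem.List.pyRange_zero_natCast, List.foldl_map, pvA_loop]

lemma pos_getD (list2 : List Int) (v : Int) :
    ((PySem.List.enumerate list2).foldl
      (fun d p => d.modify p.2 [] (fun l => l ++ [p.1])) PySem.Dict.empty).getD v []
    = (PySem.List.pyRange 0 (PySem.List.len list2)).filter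
        (fun j => PySem.List.pyGetD list2 j 0 == v) := by
  have h1 : (PySem.List.enumerate list2).foldl
      (fun d p => d.modify p.2 [] (fun l => l ++ [p.1])) PySem.Dict.empty
      = ((PySem.List.enumerate list2).map Prod.swap).foldl
          (fun d p => d.modify p.1 [] (fun l => l ++ [p.2])) PySem.Dict.empty := by
    rw [List.foldl_map]
    simp
  rw [h1, PySem.Dict.getD_foldl_modify_append, List.filter_map, List.map_map]
  rw [PySem.List.enumerate_eq_map_pyRange list2 0, List.filter_map, List.map_map]
  simp [Function.comp_def]

lemma pvHits_alt (list1 list2 : List Int) (k : Nat) :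
    ((PySem.List.pyRange 0 (PySem.List.len list2)).filter
        (fun j => PySem.List.pyGetD list2 j 0 == PySem.List.pyGetD list1 ((k : Nat) : Int) 0)).filter
      (fun j => decide (((k : Nat) : Int) ≤ j))
    = pvHits list1 list2 k := by
  rw [List.filter_filter, pvHits]
  by_cases hkm : ((k : Nat) : Int) ≤ PySem.List.len list2
  · rw [PySem.List.pyRange_one_append 0 ((k : Nat) : Int) (PySem.List.len list2)
        (by omega) hkm, List.filter_append]
    have h0 : (PySem.List.pyRange 0 ((k : Nat) : Int)).filter
        (fun j => decide (((k : Nat) : Int) ≤ j) &&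
          (PySem.List.pyGetD list2 j 0 == PySem.List.pyGetD list1 ((k : Nat) : Int) 0)) = [] := by
      refine List.filter_eq_nil_iff.mpr ?_
      intro x hx
      have hx' := PySem.List.mem_pyRange_one.mp hx
      have hd : decide (((k : Nat) : Int) ≤ x) = false := by
        simp only [decide_eq_false_iff_not]
        omega
      simp [hd]
    rw [h0, List.nil_append]
    refine List.filter_congr ?_
    intro x hx
    have hx' := PySem.List.mem_pyRange_one.mp hx
    have hle : decide (((k : Nat) : Int) ≤ x) = true := by
      simpa using hx'.1
    rw [hle, Bool.true_and]
    exact BEq.comm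
  · have hnil : PySem.List.pyRange ((k : Nat) : Int) (PySem.List.len list2) = [] := by
      refine List.eq_nil_iff_forall_not_mem.mpr ?_
      intro x hx
      have hx' := PySem.List.mem_pyRange_one.mp hx
      omega
    rw [hnil, List.filter_nil]
    refine List.filter_eq_nil_iff.mpr ?_
    intro x hx
    have hx' := PySem.List.mem_pyRange_one.mp hx
    have hd : decide (((k : Nat) : Int) ≤ x) = false := by
      simp only [decide_eq_false_iff_not]
      omega
    simp [hd]

lemma match_index_alt_eq_flatMap (list1 list2 : List Int) :
    match_index_alt list1 list2 = (List.range list1.length).flatMap (pvHits list1 list2) := by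
  unfold match_index_alt
  simp only [pos_getD]
  have hstep : ∀ (out : List Int) (p : Int × Int),
      ((PySem.List.pyRange 0 (PySem.List.len list2)).filter
          (fun j => PySem.List.pyGetD list2 j 0 == p.2)).foldl
        (fun out j => if p.1 ≤ j then out ++ [j] else out) out
      = out ++ ((PySem.List.pyRange 0 (PySem.List.len list2)).filter
          (fun j => PySem.List.pyGetD list2 j 0 == p.2)).filter
            (fun j => decide (p.1 ≤ j)) := by
    intro out p
    exact PySem.List.foldl_append_ite_eq_filter _ _ _
  simp only [hstep]
  rw [PySem.List.foldl_append_eq_flatMap, List.nil_append,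
      PySem.List.enumerate_eq_map_pyRange list1 0,
      show PySem.List.len list1 = ((list1.length : Nat) : Int) from rfl,
      PySem.List.pyRange_zero_natCast, List.map_map, List.flatMap_map]
  refine List.flatMap_congr ?_
  intro k _
  exact pvHits_alt list1 list2 k

-- ===== VERDICT (by name: the statement is the Claim_ definition above) =====
theorem match_index_spec : Claim_equal_match_index := by
  intro list1 list2 _
  unfold Spec_match_index
  rw [match_index_eq_flatMap, match_index_alt_eq_flatMap]
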